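-- pv_equiv track=rewrite | github.com/MikaelTar/Lab_Work-Hash_Gost | Hash_Gost.py | gost_encrypted_block
-- ===== SOURCE A (Python) =====
-- table = [
--     [1, 15, 13, 0, 5, 7, 10, 4, 9, 2, 3, 14, 6, 11, 8, 12],
--     [15, 4, 2, 13, 1, 11, 10, 6, 7, 3, 9, 5, 0, 14, 12, 8],
--     [7, 11, 4, 1, 9, 12, 14, 2, 0, 6, 10, 13, 15, 3, 5, 8],
--     [2, 1, 14, 7, 4, 10, 8, 13, 15, 12, 9, 0, 3, 5, 6, 11],
--     [11, 8, 12, 7, 1, 14, 2, 13, 6, 15, 0, 9, 10, 4, 5, 3],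
--     [10, 15, 4, 2, 7, 12, 9, 5, 6, 1, 13, 14, 0, 11, 3, 8],
--     [9, 14, 15, 5, 2, 8, 12, 3, 7, 0, 4, 10, 1, 13, 11, 6],
--     [4, 3, 2, 12, 9, 5, 15, 10, 11, 14, 1, 7, 6, 0, 8, 13]
-- ]
--
-- def gost_encrypt_block(left, right, key):
--     temp_sum = (left + key) % (2 ** 32)
--     substitution_result = 0
--     for i in range(8):
--         nibble = (temp_sum >> (4 * i)) & 0xF
--         substitution_result |= table[i][nibble] << (4 * i)
--     shifted_result = (substitution_result << 11) | (substitution_result >> 21)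
--     final_result = shifted_result & 0xFFFFFFFF
--     return right ^ final_result
--
-- def gost_encrypted_block(block, keys):
--     left = (block >> 32) & 0xFFFFFFFF
--     right = block & 0xFFFFFFFF
--     for i in range(24):
--         left, right = gost_encrypt_block(left, right, keys[i % 8]), left
--     for i in range(8):
--         left, right = gost_encrypt_block(left, right, keys[7 - i]), left
--     return (right << 32) | left
-- ===== SOURCE B (Python) =====
-- table = [
--     [1, 15, 13, 0, 5, 7, 10, 4, 9, 2, 3, 14, 6, 11, 8, 12],
--     [15, 4, 2, 13, 1, 11, 10, 6, 7, 3, 9, 5, 0, 14, 12, 8],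
--     [7, 11, 4, 1, 9, 12, 14, 2, 0, 6, 10, 13, 15, 3, 5, 8],
--     [2, 1, 14, 7, 4, 10, 8, 13, 15, 12, 9, 0, 3, 5, 6, 11],
--     [11, 8, 12, 7, 1, 14, 2, 13, 6, 15, 0, 9, 10, 4, 5, 3],
--     [10, 15, 4, 2, 7, 12, 9, 5, 6, 1, 13, 14, 0, 11, 3, 8],
--     [9, 14, 15, 5, 2, 8, 12, 3, 7, 0, 4, 10, 1, 13, 11, 6],
--     [4, 3, 2, 12, 9, 5, 15, 10, 11, 14, 1, 7, 6, 0, 8, 13]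
-- ]
--
-- # Classic table-driven GOST formulation: each pair of adjacent 4-bit S-boxes is merged
-- # into one byte-indexed 256-entry table with the <<11 rotation folded into the entries,
-- # so a round is 4 table lookups and 3 ORs instead of an 8-iteration nibble loop.
-- def _make(lo, hi, shift):
--     t = []
--     for b in range(256):
--         v = ((hi[b >> 4] << 4) | lo[b & 15]) << shift
--         t.append(((v << 11) | (v >> 21)) & 0xFFFFFFFF)
--     return t
--
-- _T0 = _make(table[0], table[1], 0)
-- _T1 = _make(table[2], table[3], 8)
-- _T2 = _make(table[4], table[5], 16)
-- _T3 = _make(table[6], table[7], 24)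
--
-- def gost_encrypted_block(block, keys):
--     schedule = [keys[i % 8] for i in range(24)] + [keys[7 - i] for i in range(8)]
--     l = (block >> 32) & 0xFFFFFFFF
--     r = block & 0xFFFFFFFF
--     for k in schedule:
--         s = (l + k) % 2 ** 32
--         f = _T0[s & 255] | _T1[(s >> 8) & 255] | _T2[(s >> 16) & 255] | _T3[s >> 24]
--         l, r = r ^ f, l
--     return (r << 32) | l
-- ===== Notes on version B (the rewrite author's own statement) =====
-- stated objective: alternative
-- what changed: B is the classic table-driven GOST formulation: four precomputed 256-entry byte tables (adjacent S-box pairs merged, the <<11 rotation folded into the entries) replace the per-round 8-iteration nibble substitution loop, and the two differently-indexed Feistel loops become one pass over a precomputed 32-entry key schedule.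
import Mathlib
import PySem

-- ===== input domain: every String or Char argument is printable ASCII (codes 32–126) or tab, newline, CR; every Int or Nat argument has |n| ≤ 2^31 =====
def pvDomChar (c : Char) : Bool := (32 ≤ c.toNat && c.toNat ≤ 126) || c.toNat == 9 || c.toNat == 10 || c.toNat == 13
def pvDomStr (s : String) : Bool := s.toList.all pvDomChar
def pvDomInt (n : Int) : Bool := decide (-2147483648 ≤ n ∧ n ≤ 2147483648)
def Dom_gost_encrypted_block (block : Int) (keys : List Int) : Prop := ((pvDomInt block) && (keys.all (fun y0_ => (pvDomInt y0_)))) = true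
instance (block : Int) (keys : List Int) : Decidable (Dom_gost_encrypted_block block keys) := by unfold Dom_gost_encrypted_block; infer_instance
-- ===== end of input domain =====

-- B is the classic table-driven GOST formulation: four precomputed 256-entry byte tables
-- (adjacent S-box pairs merged, the <<11 rotation folded into the entries) replace the
-- per-round nibble substitution loop, and one precomputed 32-entry key schedule replaces
-- the two differently-indexed Feistel loops (alternative structure, same exact values).


-- ===== PORT A =====
def gostTable : List (List Int) := [
    [1, 15, 13, 0, 5, 7, 10, 4, 9, 2, 3, 14, 6, 11, 8, 12],
    [15, 4, 2, 13, 1, 11, 10, 6, 7, 3, 9, 5, 0, 14, 12, 8],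
    [7, 11, 4, 1, 9, 12, 14, 2, 0, 6, 10, 13, 15, 3, 5, 8],
    [2, 1, 14, 7, 4, 10, 8, 13, 15, 12, 9, 0, 3, 5, 6, 11],
    [11, 8, 12, 7, 1, 14, 2, 13, 6, 15, 0, 9, 10, 4, 5, 3],
    [10, 15, 4, 2, 7, 12, 9, 5, 6, 1, 13, 14, 0, 11, 3, 8],
    [9, 14, 15, 5, 2, 8, 12, 3, 7, 0, 4, 10, 1, 13, 11, 6],
    [4, 3, 2, 12, 9, 5, 15, 10, 11, 14, 1, 7, 6, 0, 8, 13]]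

-- literal port of gost_encrypt_block (nibble ∈ [0,15], so the table indexing never raises)
def gost_encrypt_block (left right key : Int) : Int :=
  let temp_sum : Int := PySem.Int.mod (left + key) (2 ^ 32)
  let substitution_result : Int := (List.range 8).foldl (fun (acc : Int) (i : Nat) =>
      let nibble : Int := PySem.Int.band (temp_sum >>> (4 * i)) 0xF
      PySem.Int.bor acc ((PySem.List.pyGetD (PySem.List.pyGetD gostTable ((i : Nat) : Int) []) nibble 0) <<< (4 * i))) 0
  let shifted_result : Int := PySem.Int.bor (substitution_result <<< (11:Nat)) (substitution_result >>> (21:Nat))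
  let final_result : Int := PySem.Int.band shifted_result 0xFFFFFFFF
  PySem.Int.bxor right final_result

def gost_encrypted_block (block : Int) (keys : List Int) : Int :=
  let left : Int := PySem.Int.band (block >>> (32:Nat)) 0xFFFFFFFF
  let right : Int := PySem.Int.band block 0xFFFFFFFF
  let p1 : Int × Int := (List.range 24).foldl
      (fun (p : Int × Int) (i : Nat) => (gost_encrypt_block p.1 p.2 (PySem.List.pyGetD keys (PySem.Int.mod ((i : Nat) : Int) 8) 0), p.1)) (left, right)
  let p2 : Int × Int := (List.range 8).foldl
      (fun (p : Int × Int) (i : Nat) => (gost_encrypt_block p.1 p.2 (PySem.List.pyGetD keys ((7 : Int) - ((i : Nat) : Int)) 0), p.1)) p1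
  PySem.Int.bor (p2.2 <<< (32:Nat)) p2.1

-- ===== PORT B =====
-- _make(lo, hi, shift): a 256-entry byte table merging two S-box rows, rotation folded in
def gostMake (lo hi : List Int) (shift : Nat) : List Int :=
  (List.range 256).map (fun (b : Nat) =>
    let v : Int := (PySem.Int.bor ((PySem.List.pyGetD hi ((b >>> 4 : Nat) : Int) 0) <<< (4:Nat))
                      (PySem.List.pyGetD lo (((b &&& 15 : Nat) : Int)) 0)) <<< shift
    PySem.Int.band (PySem.Int.bor (v <<< (11:Nat)) (v >>> (21:Nat))) 0xFFFFFFFF)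

def gostT0 : List Int := gostMake (PySem.List.pyGetD gostTable 0 []) (PySem.List.pyGetD gostTable 1 []) 0
def gostT1 : List Int := gostMake (PySem.List.pyGetD gostTable 2 []) (PySem.List.pyGetD gostTable 3 []) 8
def gostT2 : List Int := gostMake (PySem.List.pyGetD gostTable 4 []) (PySem.List.pyGetD gostTable 5 []) 16
def gostT3 : List Int := gostMake (PySem.List.pyGetD gostTable 6 []) (PySem.List.pyGetD gostTable 7 []) 24

-- one round body of B's loop: s = (l+k) % 2**32; f = _T0[s&255]|_T1[(s>>8)&255]|_T2[(s>>16)&255]|_T3[s>>24]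
def gost_f_bytes (l k : Int) : Int :=
  let s : Int := PySem.Int.mod (l + k) (2 ^ 32)
  PySem.Int.bor (PySem.Int.bor (PySem.Int.bor
      (PySem.List.pyGetD gostT0 (PySem.Int.band s 255) 0)
      (PySem.List.pyGetD gostT1 (PySem.Int.band (s >>> (8 : Nat)) 255) 0))
      (PySem.List.pyGetD gostT2 (PySem.Int.band (s >>> (16 : Nat)) 255) 0))
      (PySem.List.pyGetD gostT3 (s >>> (24 : Nat)) 0)

def gost_encrypted_block_alt (block : Int) (keys : List Int) : Int :=
  let schedule : List Int :=
    ((List.range 24).map fun (i : Nat) => PySem.List.pyGetD keys (PySem.Int.mod ((i : Nat) : Int) 8) 0) ++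
    ((List.range 8).map fun (i : Nat) => PySem.List.pyGetD keys ((7 : Int) - ((i : Nat) : Int)) 0)
  let l : Int := PySem.Int.band (block >>> (32:Nat)) 0xFFFFFFFF
  let r : Int := PySem.Int.band block 0xFFFFFFFF
  let p : Int × Int := schedule.foldl (fun p k => (PySem.Int.bxor p.2 (gost_f_bytes p.1 k), p.1)) (l, r)
  PySem.Int.bor (p.2 <<< (32:Nat)) p.1

-- ===== PRECONDITION & SPEC =====
-- A indexes keys[0..7]; with fewer than 8 keys Python raises IndexError, so those inputs are excluded.
def Pre_gost_encrypted_block (block : Int) (keys : List Int) : Prop := 8 ≤ keys.length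
instance (block : Int) (keys : List Int) : Decidable (Pre_gost_encrypted_block block keys) := by unfold Pre_gost_encrypted_block; infer_instance
def pvWitness_gost_encrypted_block : Int × List Int := (123456789, [1, 2, 3, 4, 5, 6, 7, 8])

def Spec_gost_encrypted_block (block : Int) (keys : List Int) (out : Int) : Prop := out = gost_encrypted_block_alt block keys
instance (block : Int) (keys : List Int) (out : Int) : Decidable (Spec_gost_encrypted_block block keys out) := by unfold Spec_gost_encrypted_block; infer_instance

-- ===== CLAIM (what is proved, stated in full; the proofs are below) =====
def Claim_equal_gost_encrypted_block : Prop := ∀ (block : Int) (keys : List Int), Dom_gost_encrypted_block block keys → Pre_gost_encrypted_block block keys → Spec_gost_encrypted_block block keys (gost_encrypted_block block keys)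

-- ===== LEMMAS AND PROOFS =====

def av (r : List Int) (j : Nat) : Nat := (r.getD j 0).toNat

theorem row_nonneg (r : List Int) (hr : r ∈ gostTable) (j : Nat) : 0 ≤ r.getD j 0 := by
  by_cases h : j < r.length
  · have hm : r.getD j 0 ∈ r := by
      rw [List.getD_eq_getElem r 0 h]; exact List.getElem_mem h
    have hall : ∀ x ∈ r, (0:Int) ≤ x := by fin_cases hr <;> decide
    exact hall _ hm
  · rw [List.getD_eq_default r 0 (by omega)]

theorem pyGetD_av (r : List Int) (hr : r ∈ gostTable) (j : Nat) :
    PySem.List.pyGetD r ((j : Nat) : Int) 0 = ((av r j : Nat) : Int) := by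
  rw [PySem.List.pyGetD_natCast, av, Int.toNat_of_nonneg (row_nonneg r hr j)]

theorem gostMake_entry (lo hi : List Int) (shift b : Nat) (hb : b < 256) :
    PySem.List.pyGetD (gostMake lo hi shift) ((b : Nat) : Int) 0 =
      PySem.Int.band (PySem.Int.bor
        (((PySem.Int.bor ((PySem.List.pyGetD hi ((b >>> 4 : Nat) : Int) 0) <<< (4:Nat))
            (PySem.List.pyGetD lo (((b &&& 15 : Nat) : Int)) 0)) <<< shift) <<< (11:Nat))
        (((PySem.Int.bor ((PySem.List.pyGetD hi ((b >>> 4 : Nat) : Int) 0) <<< (4:Nat))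
            (PySem.List.pyGetD lo (((b &&& 15 : Nat) : Int)) 0)) <<< shift) >>> (21:Nat))) 0xFFFFFFFF := by
  rw [PySem.List.pyGetD_natCast, gostMake, PySem.List.getD_map_range _ _ _ _ hb]

theorem natEndgame (a0 a1 a2 a3 a4 a5 a6 a7 : Nat) :
    ((a0 ||| a1 <<< 4 ||| a2 <<< 8 ||| a3 <<< 12 ||| a4 <<< 16 ||| a5 <<< 20 ||| a6 <<< 24 ||| a7 <<< 28) <<< 11 |||
     (a0 ||| a1 <<< 4 ||| a2 <<< 8 ||| a3 <<< 12 ||| a4 <<< 16 ||| a5 <<< 20 ||| a6 <<< 24 ||| a7 <<< 28) >>> 21) &&& 4294967295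
  = ((a1 <<< 4 ||| a0) <<< 11 ||| (a1 <<< 4 ||| a0) >>> 21) &&& 4294967295 |||
    ((a3 <<< 4 ||| a2) <<< 8 <<< 11 ||| (a3 <<< 4 ||| a2) <<< 8 >>> 21) &&& 4294967295 |||
    ((a5 <<< 4 ||| a4) <<< 16 <<< 11 ||| (a5 <<< 4 ||| a4) <<< 16 >>> 21) &&& 4294967295 |||
    ((a7 <<< 4 ||| a6) <<< 24 <<< 11 ||| (a7 <<< 4 ||| a6) <<< 24 >>> 21) &&& 4294967295 := by
  simp only [Nat.shiftLeft_or_distrib, Nat.shiftRight_or_distrib, Nat.and_or_distrib_right,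
    Nat.zero_or, ← Nat.shiftLeft_add]
  norm_num
  simp only [Nat.or_assoc]
  simp only [Nat.or_comm, Nat.or_left_comm]

set_option maxRecDepth 8192 in
theorem gostRound_eq (l r k : Int) : gost_encrypt_block l r k = PySem.Int.bxor r (gost_f_bytes l k) := by
  obtain ⟨n, hsn, hn⟩ : ∃ n : Nat, PySem.Int.mod (l + k) (2 ^ 32) = (n : Int) ∧ n < 4294967296 := by
    have h0 := PySem.Int.mod_nonneg (l + k) (show (0:Int) < 2 ^ 32 by norm_num)
    have h1 := PySem.Int.mod_lt (l + k) (show (0:Int) < 2 ^ 32 by norm_num)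
    exact ⟨(PySem.Int.mod (l + k) (2 ^ 32)).toNat, by omega, by omega⟩
  unfold gost_encrypt_block gost_f_bytes
  rw [hsn]
  simp only []
  congr 1
  have hb0 : n &&& 255 < 256 := by rw [Nat.and_two_pow_sub_one_eq_mod n 8]; omega
  have hb1 : (n >>> 8) &&& 255 < 256 := by rw [Nat.and_two_pow_sub_one_eq_mod (n >>> 8) 8]; omega
  have hb2 : (n >>> 16) &&& 255 < 256 := by rw [Nat.and_two_pow_sub_one_eq_mod (n >>> 16) 8]; omega
  have hb3 : n >>> 24 < 256 := by
    rw [Nat.shiftRight_eq_div_pow]; omega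
  have hc0 : PySem.Int.band ((n:Int)) 255 = (((n &&& 255 : Nat)) : Int) := by norm_cast
  have hc1 : PySem.Int.band ((n:Int) >>> (8:Nat)) 255 = ((((n >>> 8) &&& 255 : Nat)) : Int) := by norm_cast
  have hc2 : PySem.Int.band ((n:Int) >>> (16:Nat)) 255 = ((((n >>> 16) &&& 255 : Nat)) : Int) := by norm_cast
  have hc3 : ((n:Int)) >>> (24:Nat) = (((n >>> 24 : Nat)) : Int) := by norm_cast
  rw [show gostT0 = gostMake [1, 15, 13, 0, 5, 7, 10, 4, 9, 2, 3, 14, 6, 11, 8, 12] [15, 4, 2, 13, 1, 11, 10, 6, 7, 3, 9, 5, 0, 14, 12, 8] 0 from rfl,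
      show gostT1 = gostMake [7, 11, 4, 1, 9, 12, 14, 2, 0, 6, 10, 13, 15, 3, 5, 8] [2, 1, 14, 7, 4, 10, 8, 13, 15, 12, 9, 0, 3, 5, 6, 11] 8 from rfl,
      show gostT2 = gostMake [11, 8, 12, 7, 1, 14, 2, 13, 6, 15, 0, 9, 10, 4, 5, 3] [10, 15, 4, 2, 7, 12, 9, 5, 6, 1, 13, 14, 0, 11, 3, 8] 16 from rfl,
      show gostT3 = gostMake [9, 14, 15, 5, 2, 8, 12, 3, 7, 0, 4, 10, 1, 13, 11, 6] [4, 3, 2, 12, 9, 5, 15, 10, 11, 14, 1, 7, 6, 0, 8, 13] 24 from rfl,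
      hc0, hc1, hc2, hc3,
      gostMake_entry _ _ _ _ hb0, gostMake_entry _ _ _ _ hb1,
      gostMake_entry _ _ _ _ hb2, gostMake_entry _ _ _ _ hb3]
  rw [pyGetD_av [1, 15, 13, 0, 5, 7, 10, 4, 9, 2, 3, 14, 6, 11, 8, 12] (by decide) (n &&& 255 &&& 15),
      pyGetD_av [15, 4, 2, 13, 1, 11, 10, 6, 7, 3, 9, 5, 0, 14, 12, 8] (by decide) ((n &&& 255) >>> 4),
      pyGetD_av [7, 11, 4, 1, 9, 12, 14, 2, 0, 6, 10, 13, 15, 3, 5, 8] (by decide) (n >>> 8 &&& 255 &&& 15),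
      pyGetD_av [2, 1, 14, 7, 4, 10, 8, 13, 15, 12, 9, 0, 3, 5, 6, 11] (by decide) ((n >>> 8 &&& 255) >>> 4),
      pyGetD_av [11, 8, 12, 7, 1, 14, 2, 13, 6, 15, 0, 9, 10, 4, 5, 3] (by decide) (n >>> 16 &&& 255 &&& 15),
      pyGetD_av [10, 15, 4, 2, 7, 12, 9, 5, 6, 1, 13, 14, 0, 11, 3, 8] (by decide) ((n >>> 16 &&& 255) >>> 4),
      pyGetD_av [9, 14, 15, 5, 2, 8, 12, 3, 7, 0, 4, 10, 1, 13, 11, 6] (by decide) (n >>> 24 &&& 15),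
      pyGetD_av [4, 3, 2, 12, 9, 5, 15, 10, 11, 14, 1, 7, 6, 0, 8, 13] (by decide) ((n >>> 24) >>> 4)]
  have e1 : (n &&& 255) >>> 4 = n >>> 4 &&& 15 := by rw [Nat.shiftRight_and_distrib]; congr 1
  have e2 : n &&& 255 &&& 15 = n &&& 15 := by rw [Nat.and_assoc]; congr 1
  have e3 : (n >>> 8 &&& 255) >>> 4 = n >>> 12 &&& 15 := by
    rw [Nat.shiftRight_and_distrib, ← Nat.shiftRight_add]; congr 1
  have e4 : n >>> 8 &&& 255 &&& 15 = n >>> 8 &&& 15 := by rw [Nat.and_assoc]; congr 1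
  have e5 : (n >>> 16 &&& 255) >>> 4 = n >>> 20 &&& 15 := by
    rw [Nat.shiftRight_and_distrib, ← Nat.shiftRight_add]; congr 1
  have e6 : n >>> 16 &&& 255 &&& 15 = n >>> 16 &&& 15 := by rw [Nat.and_assoc]; congr 1
  have e7 : (n >>> 24) >>> 4 = n >>> 28 &&& 15 := by
    have h1 : (n >>> 24) >>> 4 = n >>> 28 := by rw [← Nat.shiftRight_add]
    have h28 : n >>> 28 < 16 := by rw [Nat.shiftRight_eq_div_pow]; omega
    have h2 : n >>> 28 &&& 15 = n >>> 28 := by rw [Nat.and_two_pow_sub_one_eq_mod (n >>> 28) 4]; omega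
    rw [h1, h2]
  rw [e1, e2, e3, e4, e5, e6, e7]
  norm_num [List.range_succ, List.range_zero, List.foldl_append, List.foldl_cons, List.foldl_nil,
    gostTable, PySem.List.pyGetD_ofNat']
  simp only [PySem.Int.bor_comm 0, PySem.Int.bor_zero]
  have hd0 : PySem.Int.band ((n : Nat) : Int) 15 = (((n &&& 15 : Nat)) : Int) := by norm_cast
  have hd : ∀ c : Nat, PySem.Int.band (((n : Nat) : Int) >>> c) 15 = (((n >>> c &&& 15 : Nat)) : Int) := by
    intro c; norm_cast
  rw [hd0, hd 4, hd 8, hd 12, hd 16, hd 20, hd 24, hd 28,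
      pyGetD_av [1, 15, 13, 0, 5, 7, 10, 4, 9, 2, 3, 14, 6, 11, 8, 12] (by decide) (n &&& 15),
      pyGetD_av [15, 4, 2, 13, 1, 11, 10, 6, 7, 3, 9, 5, 0, 14, 12, 8] (by decide) (n >>> 4 &&& 15),
      pyGetD_av [7, 11, 4, 1, 9, 12, 14, 2, 0, 6, 10, 13, 15, 3, 5, 8] (by decide) (n >>> 8 &&& 15),
      pyGetD_av [2, 1, 14, 7, 4, 10, 8, 13, 15, 12, 9, 0, 3, 5, 6, 11] (by decide) (n >>> 12 &&& 15),
      pyGetD_av [11, 8, 12, 7, 1, 14, 2, 13, 6, 15, 0, 9, 10, 4, 5, 3] (by decide) (n >>> 16 &&& 15),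
      pyGetD_av [10, 15, 4, 2, 7, 12, 9, 5, 6, 1, 13, 14, 0, 11, 3, 8] (by decide) (n >>> 20 &&& 15),
      pyGetD_av [9, 14, 15, 5, 2, 8, 12, 3, 7, 0, 4, 10, 1, 13, 11, 6] (by decide) (n >>> 24 &&& 15),
      pyGetD_av [4, 3, 2, 12, 9, 5, 15, 10, 11, 14, 1, 7, 6, 0, 8, 13] (by decide) (n >>> 28 &&& 15)]
  norm_cast
  rw [show (4294967295:Int) = ((4294967295:Nat):Int) from by norm_cast]
  simp only [PySem.Int.bor_natCast, PySem.Int.band_natCast, ← Int.natCast_shiftLeft, ← Int.natCast_shiftRight]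
  rw [Nat.cast_inj]
  exact natEndgame (av [1, 15, 13, 0, 5, 7, 10, 4, 9, 2, 3, 14, 6, 11, 8, 12] (n &&& 15)) (av [15, 4, 2, 13, 1, 11, 10, 6, 7, 3, 9, 5, 0, 14, 12, 8] (n >>> 4 &&& 15)) (av [7, 11, 4, 1, 9, 12, 14, 2, 0, 6, 10, 13, 15, 3, 5, 8] (n >>> 8 &&& 15)) (av [2, 1, 14, 7, 4, 10, 8, 13, 15, 12, 9, 0, 3, 5, 6, 11] (n >>> 12 &&& 15)) (av [11, 8, 12, 7, 1, 14, 2, 13, 6, 15, 0, 9, 10, 4, 5, 3] (n >>> 16 &&& 15)) (av [10, 15, 4, 2, 7, 12, 9, 5, 6, 1, 13, 14, 0, 11, 3, 8] (n >>> 20 &&& 15)) (av [9, 14, 15, 5, 2, 8, 12, 3, 7, 0, 4, 10, 1, 13, 11, 6] (n >>> 24 &&& 15)) (av [4, 3, 2, 12, 9, 5, 15, 10, 11, 14, 1, 7, 6, 0, 8, 13] (n >>> 28 &&& 15))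

theorem gost_encrypted_block_eq (block : Int) (keys : List Int) :
    gost_encrypted_block block keys = gost_encrypted_block_alt block keys := by
  simp only [gost_encrypted_block, gost_encrypted_block_alt, List.foldl_append, List.foldl_map,
    gostRound_eq]

-- ===== VERDICT (by name: the statement is the Claim_ definition above) =====
theorem gost_encrypted_block_spec : Claim_equal_gost_encrypted_block := by
  intro block keys _ _
  unfold Spec_gost_encrypted_block
  exact gost_encrypted_block_eq block keys
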